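-- pv_equiv track=rewrite | github.com/delos0/Image-Processing-Application | src/main/Image_processing.py | sort_columns
-- ===== SOURCE A (Python) =====
-- def sort_columns(matrix):
--     temp = [[0 for i in range(len(matrix))] for j in range(len(matrix[0]))]
--
--     for i in range(len(matrix)):
--         for j in range(len(matrix[0])):
--             temp[j][i] = matrix[i][j]
--
--     for i in range(len(temp)):
--         temp[i].sort()
--
--     for i in range(len(matrix)):
--         for j in range(len(matrix[0])):
--             matrix[i][j] = temp[j][i]
--     return matrix
-- ===== SOURCE B (Python) =====
-- # B: tag every entry with its column index and do ONE global sort of all tagged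
-- # entries by (column, value); the sorted stream then holds each column's values
-- # contiguously and already in order, so a single scatter writes them back.
-- def sort_columns(matrix):
--     n, m = len(matrix), len(matrix[0])
--     flat = sorted((j, matrix[i][j]) for j in range(m) for i in range(n))
--     for j in range(m):
--         for i in range(n):
--             matrix[i][j] = flat[j * n + i][1]
--     return matrix
-- ===== Notes on version B (the rewrite author's own statement) =====
-- stated objective: alternative
-- what changed: A builds a full transposed table, sorts each of its rows in place, then copies the table back in a third double loop; B performs a single global sort of all entries tagged with their column index, keyed by (column, value), and scatters the one sorted stream straight back by index arithmetic — no transposed table and one sort call instead of one per column. Pre_ excludes only inputs where A raises IndexError (empty matrix, or a row shorter than row 0); B raises there too.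
import Mathlib
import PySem

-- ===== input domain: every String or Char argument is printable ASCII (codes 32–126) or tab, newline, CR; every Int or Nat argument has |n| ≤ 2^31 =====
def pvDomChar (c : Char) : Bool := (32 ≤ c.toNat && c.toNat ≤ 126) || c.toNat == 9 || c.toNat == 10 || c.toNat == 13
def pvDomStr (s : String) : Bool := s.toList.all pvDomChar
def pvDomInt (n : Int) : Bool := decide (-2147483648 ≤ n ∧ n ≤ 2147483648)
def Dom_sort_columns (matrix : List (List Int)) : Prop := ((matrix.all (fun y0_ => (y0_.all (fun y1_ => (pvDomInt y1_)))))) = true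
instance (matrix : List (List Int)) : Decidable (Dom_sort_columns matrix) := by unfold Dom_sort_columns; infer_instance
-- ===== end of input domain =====

-- B replaces A's transpose / sort-each-row / copy-back three-pass structure by ONE global sort of
-- all entries tagged with their column index, keyed by (column, value), scattered back by index
-- arithmetic (objective: alternative). Both mutate matrix in place in Python to the same final state.

-- shared safe accessor: t[i][j] (indices are in range wherever the ports use it under Pre_)
def pvEnt (t : List (List Int)) (i j : Nat) : Int := (t.getD i []).getD j 0

-- ===== PORT A =====
def sort_columns (matrix : List (List Int)) : List (List Int) :=
  let n := matrix.length
  let m := (matrix.getD 0 []).length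
  let temp0 := (List.range m).map (fun _ => (List.range n).map (fun _ => (0 : Int)))
  let temp1 := (List.range n).foldl (fun t i =>
      (List.range m).foldl (fun t j => t.modify j (fun r => r.set i (pvEnt matrix i j))) t) temp0
  let temp2 := (List.range temp1.length).foldl (fun t i =>
      t.set i (PySem.List.sorted (t.getD i []) (fun x => x) false)) temp1
  (List.range n).foldl (fun mt i =>
      (List.range m).foldl (fun mt j => mt.modify i (fun r => r.set j (pvEnt temp2 j i))) mt) matrix

-- ===== PORT B =====
-- flat = sorted((j, matrix[i][j]) for j in range(m) for i in range(n)); Python's plain tuple sort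
-- is PySem.List.sorted2 on the two components. The read flat[j*n+i] is in range under Pre_
-- (flat has m*n elements), so getD with a dummy default is exact there.
def sort_columns_alt (matrix : List (List Int)) : List (List Int) :=
  let n := matrix.length
  let m := (matrix.getD 0 []).length
  let flat := PySem.List.sorted2
      ((List.range m).flatMap (fun (j : Nat) => (List.range n).map (fun i => ((j : Int), pvEnt matrix i j))))
      (fun p => p.1) (fun p => p.2) false
  (List.range m).foldl (fun mt j =>
      (List.range n).foldl
        (fun mt i => mt.modify i (fun r => r.set j (flat.getD (j * n + i) (0, 0)).2)) mt) matrix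

-- ===== PRECONDITION & SPEC =====
-- Pre_ excludes exactly the inputs where the Python A raises IndexError: the empty matrix
-- (matrix[0]) and ragged matrices with some row shorter than row 0 (matrix[i][j]); B raises there too.
def Pre_sort_columns (matrix : List (List Int)) : Prop :=
  matrix ≠ [] ∧ ∀ row ∈ matrix, (matrix.getD 0 []).length ≤ row.length
instance (matrix : List (List Int)) : Decidable (Pre_sort_columns matrix) := by
  unfold Pre_sort_columns; infer_instance
def pvWitness_sort_columns : List (List Int) := [[3, 1], [2, 4], [1, 0]]

def Spec_sort_columns (matrix : List (List Int)) (out : List (List Int)) : Prop := out = sort_columns_alt matrix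
instance (matrix : List (List Int)) (out : List (List Int)) : Decidable (Spec_sort_columns matrix out) := by unfold Spec_sort_columns; infer_instance

-- ===== CLAIM (what is proved, stated in full; the proofs are below) =====
def Claim_equal_sort_columns : Prop := ∀ (matrix : List (List Int)), Dom_sort_columns matrix → Pre_sort_columns matrix → Spec_sort_columns matrix (sort_columns matrix)

-- ===== LEMMAS AND PROOFS =====

-- the sorted columns, the common shape both ports are reduced to
def pvCol (matrix : List (List Int)) (j : Nat) : List Int :=
  PySem.List.sorted ((List.range matrix.length).map (fun i => pvEnt matrix i j)) (fun x => x) false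

-- (t.modify i f).modify i g = t.modify i (g ∘ f)
theorem pvModifyModify {α : Type} (t : List α) (i : Nat) (f g : α → α) :
    (t.modify i f).modify i g = t.modify i (fun x => g (f x)) := by
  apply List.ext_getElem
  · simp [List.length_modify]
  · intro k h1 h2
    simp only [List.getElem_modify]
    split_ifs <;> simp_all

-- folding modify at varying indices 0..mm-1 = mapIdx with a guard
theorem pvFoldModify {α : Type} (g : Nat → α → α) (mm : Nat) (t : List α) :
    (List.range mm).foldl (fun t j => t.modify j (g j)) t
      = t.mapIdx (fun j x => if j < mm then g j x else x) := by
  induction mm with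
  | zero =>
      simp only [List.range_zero, List.foldl_nil]
      apply List.ext_getElem
      · simp
      · intro k h1 h2; simp [List.getElem_mapIdx]
  | succ mm ih =>
      rw [List.range_succ, List.foldl_append, List.foldl_cons, List.foldl_nil, ih]
      apply List.ext_getElem
      · simp [List.length_modify]
      · intro k h1 h2
        simp only [List.getElem_modify, List.getElem_mapIdx]
        rcases lt_trichotomy k mm with h | h | h
        · simp [Nat.ne_of_gt h, h, Nat.lt_succ_of_lt h]
        · subst h; simp
        · have h5 : ¬ k < mm := by omega
          have h6 : ¬ k < mm + 1 := by omega
          have h7 : mm ≠ k := by omega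
          simp [h5, h6, h7]

-- folding set at varying indices 0..mm-1 (value independent of old entry)
theorem pvFoldSet {α : Type} (v : Nat → α) (mm : Nat) (t : List α) :
    (List.range mm).foldl (fun t j => t.set j (v j)) t
      = t.mapIdx (fun j x => if j < mm then v j else x) := by
  have := pvFoldModify (fun j (_ : α) => v j) mm t
  simpa [List.set_eq_modify] using this

-- folding modify at one fixed index composes into a single modify
theorem pvFoldModifyFix {α : Type} (i : Nat) (h : Nat → α → α) (l : List Nat) (t : List α) :
    l.foldl (fun t j => t.modify i (h j)) t
      = t.modify i (fun x => l.foldl (fun x j => h j x) x) := by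
  induction l generalizing t with
  | nil =>
      simp only [List.foldl_nil]
      apply List.ext_getElem
      · simp [List.length_modify]
      · intro k h1 h2
        rw [List.getElem_modify]
        split_ifs <;> rfl
  | cons j l ih =>
      rw [List.foldl_cons, ih, pvModifyModify]
      simp only [List.foldl_cons]

-- the sorting pass: folding set i (sorted t[i]) over 0..k-1
theorem pvFoldSortFold (k : Nat) (t : List (List Int)) (hk : k ≤ t.length) :
    (List.range k).foldl (fun t i => t.set i (PySem.List.sorted (t.getD i []) (fun x => x) false)) t
      = t.mapIdx (fun i r => if i < k then PySem.List.sorted r (fun x => x) false else r) := by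
  induction k with
  | zero =>
      simp only [List.range_zero, List.foldl_nil]
      apply List.ext_getElem
      · simp
      · intro i h1 h2; simp [List.getElem_mapIdx]
  | succ k ih =>
      have hk' : k ≤ t.length := Nat.le_of_succ_le hk
      rw [List.range_succ, List.foldl_append, List.foldl_cons, List.foldl_nil, ih hk']
      have hklen : k < t.length := hk
      have hget : (t.mapIdx (fun i r => if i < k then PySem.List.sorted r (fun x => x) false else r)).getD k []
          = t[k] := by
        rw [List.getD_eq_getElem _ _ (by simpa using hklen)]
        simp [List.getElem_mapIdx]
      rw [hget]
      apply List.ext_getElem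
      · simp
      · intro i h1 h2
        simp only [List.getElem_set, List.getElem_mapIdx]
        rcases lt_trichotomy i k with h | h | h
        · simp [Nat.ne_of_gt h, h, Nat.lt_succ_of_lt h]
        · subst h; simp
        · have h3 : ¬ i < k := by omega
          have h4 : ¬ i < k + 1 := by omega
          simp [Nat.ne_of_lt h, h3, h4]

-- the transpose-filling double loop
theorem pvTransFold (matrix : List (List Int)) (m : Nat) (k : Nat) (hk : k ≤ matrix.length) :
    (List.range k).foldl (fun t i =>
        (List.range m).foldl (fun t j => t.modify j (fun r => r.set i (pvEnt matrix i j))) t)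
      ((List.range m).map (fun _ => (List.range matrix.length).map (fun _ => (0 : Int))))
      = (List.range m).map (fun j => (List.range matrix.length).map
          (fun i => if i < k then pvEnt matrix i j else 0)) := by
  induction k with
  | zero =>
      simp only [List.range_zero, List.foldl_nil]
      apply List.ext_getElem
      · simp
      · intro j h1 h2; simp
  | succ k ih =>
      have hk' : k ≤ matrix.length := Nat.le_of_succ_le hk
      rw [List.range_succ, List.foldl_append, List.foldl_cons, List.foldl_nil, ih hk']
      rw [pvFoldModify]
      apply List.ext_getElem
      · simp
      · intro j h1 h2
        simp only [List.getElem_mapIdx, List.getElem_map, List.getElem_range]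
        have hj : j < m := by simpa using h1
        simp only [hj, if_pos]
        apply List.ext_getElem
        · simp
        · intro i h3 h4
          simp only [List.getElem_set, List.getElem_map, List.getElem_range]
          rcases lt_trichotomy i k with h | h | h
          · simp [Nat.ne_of_gt h, h, Nat.lt_succ_of_lt h]
          · subst h; simp
          · have h5 : ¬ i < k := by omega
            have h6 : ¬ i < k + 1 := by omega
            simp [Nat.ne_of_lt h, h5, h6]

-- A's result, in closed form
theorem pvA_closed (matrix : List (List Int)) :
    sort_columns matrix
      = matrix.mapIdx (fun i row => row.mapIdx (fun j x =>
          if j < (matrix.getD 0 []).length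
          then pvEnt ((List.range (matrix.getD 0 []).length).map (pvCol matrix)) j i
          else x)) := by
  dsimp only [sort_columns]
  set n := matrix.length with hn
  set m := (matrix.getD 0 []).length with hm
  have h1 := pvTransFold matrix m n (by omega)
  rw [← hn] at h1
  rw [h1]
  have htrans : (List.range m).map (fun j => (List.range n).map
        (fun i => if i < n then pvEnt matrix i j else 0))
      = (List.range m).map (fun j => (List.range n).map (fun i => pvEnt matrix i j)) := by
    apply List.map_congr_left; intro j _
    apply List.map_congr_left; intro i hi
    simp_all [List.mem_range]
  rw [htrans]
  set trans := (List.range m).map (fun j => (List.range n).map (fun i => pvEnt matrix i j)) with htr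
  have hlen : trans.length = m := by simp [htr]
  rw [hlen]
  have h2 := pvFoldSortFold m trans (by omega)
  rw [h2]
  have hcols : trans.mapIdx (fun i r => if i < m then PySem.List.sorted r (fun x => x) false else r)
      = (List.range m).map (pvCol matrix) := by
    apply List.ext_getElem
    · simp [htr]
    · intro j h1' h2'
      have hj : j < m := by simpa [htr] using h2'
      have hjt : j < trans.length := by simpa [htr] using hj
      simp [List.getElem_mapIdx, htr, hj, pvCol, hn]
  rw [hcols]
  set cols := (List.range m).map (pvCol matrix) with hc
  have h3 : ∀ (mt : List (List Int)),
      (List.range n).foldl (fun mt i =>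
          (List.range m).foldl (fun mt j => mt.modify i (fun r => r.set j (pvEnt cols j i))) mt) mt
        = mt.mapIdx (fun i row => if i < n then
            (List.range m).foldl (fun r j => r.set j (pvEnt cols j i)) row else row) := by
    intro mt
    have hfun : (fun (mt : List (List Int)) (i : Nat) =>
          (List.range m).foldl (fun mt j => mt.modify i (fun r => r.set j (pvEnt cols j i))) mt)
        = fun mt i => mt.modify i (fun row => (List.range m).foldl (fun r j => r.set j (pvEnt cols j i)) row) := by
      funext mt' i
      exact pvFoldModifyFix i (fun j r => r.set j (pvEnt cols j i)) (List.range m) mt'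
    rw [hfun]
    exact pvFoldModify _ n mt
  rw [h3]
  apply List.ext_getElem
  · simp
  · intro i h1' h2'
    have hi : i < n := by simpa [hn] using h1'
    simp only [List.getElem_mapIdx, hi, if_pos]
    rw [pvFoldSet]

-- B-side lemma 1: sorted2 on int pairs is the unique lex-nondecreasing rearrangement
theorem pvSorted2Eq (xs ys : List (Int × Int)) (hperm : ys.Perm xs)
    (hsort : ys.Pairwise (fun a b => toLex a ≤ toLex b)) :
    PySem.List.sorted2 xs (fun p => p.1) (fun p => p.2) false = ys := by
  have hbefore : (fun (a b : Int × Int) =>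
        (decide (a.1 < b.1) || (!decide (b.1 < a.1) && decide (a.2 < b.2))))
      = fun a b => decide (toLex a < toLex b) := by
    funext a b
    have : (toLex a < toLex b) ↔ (a.1 < b.1 ∨ a.1 = b.1 ∧ a.2 < b.2) := Prod.Lex.lt_iff
    rcases lt_trichotomy a.1 b.1 with h | h | h <;>
      simp [this, h, not_lt_of_gt]
    all_goals omega
  have hpair : (PySem.List.sorted2 xs (fun p => p.1) (fun p => p.2) false).Pairwise
      (fun a b => toLex a ≤ toLex b) := by
    have hunf : PySem.List.sorted2 xs (fun p => p.1) (fun p => p.2) false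
        = xs.foldl (fun acc x => PySem.List.insertBy
            (fun (a b : Int × Int) =>
              (decide (a.1 < b.1) || (!decide (b.1 < a.1) && decide (a.2 < b.2)))) x acc) [] := rfl
    rw [hunf, hbefore]
    have haux : ∀ (l : List (Int × Int)) (acc : List (Int × Int)),
        acc.Pairwise (fun a b => toLex a ≤ toLex b) →
        (l.foldl (fun acc x =>
            PySem.List.insertBy (fun a b => decide (toLex a < toLex b)) x acc) acc).Pairwise
          (fun a b => toLex a ≤ toLex b) := by
      intro l
      induction l with
      | nil => intro acc h; exact h
      | cons x l ih =>
          intro acc h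
          exact ih _ (PySem.List.insertBy_pairwise_le toLex x acc h)
    exact haux xs [] List.Pairwise.nil
  exact PySem.List.eq_of_perm_of_pairwise_le_of_injective toLex toLex.injective
    ((PySem.List.sorted2_perm xs _ _ false).trans hperm.symm) hpair hsort

-- B-side lemma 2: the tagged global sort, block by block
theorem pvFlatClosed (matrix : List (List Int)) (m : Nat) :
    PySem.List.sorted2
        ((List.range m).flatMap (fun (j : Nat) =>
          (List.range matrix.length).map (fun i => ((j : Int), pvEnt matrix i j))))
        (fun p => p.1) (fun p => p.2) false
      = (List.range m).flatMap (fun j => (pvCol matrix j).map (fun v => ((j : Int), v))) := by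
  apply pvSorted2Eq
  · -- permutation, block by block
    apply List.Perm.flatMap_left
    intro j _
    have hp := (PySem.List.sorted_perm ((List.range matrix.length).map (fun i => pvEnt matrix i j))
      (fun x : Int => x) false).map (fun v => ((j : Int), v))
    simpa [pvCol, List.map_map, Function.comp] using hp
  · -- lex-sortedness of the blocks laid end to end
    rw [List.flatMap_def, List.pairwise_flatten]
    constructor
    · intro l hl
      simp only [List.mem_map, List.mem_range] at hl
      obtain ⟨j, _, rfl⟩ := hl
      refine List.Pairwise.map _ (fun a b (hab : a ≤ b) => ?_)
        (PySem.List.sorted_pairwise _ (fun x => x) )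
      exact Prod.Lex.le_iff.mpr (Or.inr ⟨rfl, hab⟩)
    · rw [List.pairwise_map]
      refine (List.pairwise_lt_range).imp ?_
      intro j1 j2 hlt x hx y hy
      simp only [List.mem_map] at hx hy
      obtain ⟨v1, _, rfl⟩ := hx
      obtain ⟨v2, _, rfl⟩ := hy
      refine Prod.Lex.le_iff.mpr (Or.inl ?_)
      simp only [ofLex_toLex]
      exact_mod_cast hlt

-- B-side lemma 3: indexing into equal-length blocks laid end to end
theorem pvFlatGet : ∀ (j : Nat) (f : Nat → List (Int × Int)) (n : Nat),
    (∀ t, (f t).length = n) → ∀ (m i : Nat), j < m → i < n →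
    ((List.range m).flatMap f).getD (j * n + i) (0, 0) = (f j).getD i (0, 0) := by
  intro j
  induction j with
  | zero =>
      intro f n hlen m i hj hi
      obtain ⟨m', rfl⟩ : ∃ m', m = m' + 1 := ⟨m - 1, by omega⟩
      rw [List.range_succ_eq_map, List.flatMap_cons]
      rw [List.getD_append _ _ _ _ (by rw [hlen]; omega)]
      have h0 : 0 * n + i = i := by omega
      rw [h0]
  | succ j ih =>
      intro f n hlen m i hj hi
      obtain ⟨m', rfl⟩ : ∃ m', m = m' + 1 := ⟨m - 1, by omega⟩
      rw [List.range_succ_eq_map, List.flatMap_cons, List.flatMap_map]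
      rw [List.getD_append_right _ _ _ _ (by rw [hlen]; ring_nf; omega)]
      have h1 : (j + 1) * n + i - (f 0).length = j * n + i := by rw [hlen]; ring_nf; omega
      rw [h1]
      exact ih (fun t => f (t + 1)) n (fun t => hlen (t + 1)) m' i (by omega) hi

-- B-side lemma 4: the outer fold of per-row rewrites is a single mapIdx
theorem pvFoldlMapIdx {α : Type} (F : Nat → Nat → α → α) (l : List Nat) (mt : List α) :
    l.foldl (fun mt j => mt.mapIdx (fun i r => F j i r)) mt
      = mt.mapIdx (fun i r => l.foldl (fun r j => F j i r) r) := by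
  induction l generalizing mt with
  | nil =>
      simp only [List.foldl_nil]
      apply List.ext_getElem
      · simp
      · intro k h1 h2; simp [List.getElem_mapIdx]
  | cons j l ih =>
      rw [List.foldl_cons, ih, List.mapIdx_mapIdx]
      rfl

-- B's result, in the same closed form
theorem pvB_closed (matrix : List (List Int)) :
    sort_columns_alt matrix
      = matrix.mapIdx (fun i row => row.mapIdx (fun j x =>
          if j < (matrix.getD 0 []).length
          then pvEnt ((List.range (matrix.getD 0 []).length).map (pvCol matrix)) j i
          else x)) := by
  dsimp only [sort_columns_alt]
  rw [pvFlatClosed matrix (matrix.getD 0 []).length]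
  set n := matrix.length with hn
  set m := (matrix.getD 0 []).length with hm
  set flat := (List.range m).flatMap (fun j => (pvCol matrix j).map (fun v => ((j : Int), v)))
    with hflat
  have hcollen : ∀ t, ((pvCol matrix t).map (fun v => ((t : Int), v))).length = n := by
    intro t
    simp [pvCol, PySem.List.length_sorted, hn]
  have hfun : (fun (mt : List (List Int)) (j : Nat) =>
        (List.range n).foldl (fun mt i => mt.modify i
          (fun r => r.set j (flat.getD (j * n + i) (0, 0)).2)) mt)
      = fun mt j => mt.mapIdx (fun i r =>
          if i < n then r.set j (flat.getD (j * n + i) (0, 0)).2 else r) := by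
    funext mt j
    exact pvFoldModify _ n mt
  rw [hfun, pvFoldlMapIdx]
  apply List.ext_getElem
  · simp
  · intro i h1 h2
    have hi : i < n := by simpa [hn] using h1
    simp only [List.getElem_mapIdx]
    have hstep : (List.range m).foldl (fun r j =>
          if i < n then r.set j (flat.getD (j * n + i) (0, 0)).2 else r) (matrix[i])
        = (List.range m).foldl (fun r j =>
            r.set j (flat.getD (j * n + i) (0, 0)).2) (matrix[i]) := by
      simp only [hi, if_pos]
    rw [hstep, pvFoldSet]
    apply List.ext_getElem
    · simp
    · intro j h3 h4
      simp only [List.getElem_mapIdx]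
      by_cases hj : j < m
      · simp only [hj, if_pos]
        rw [hflat, pvFlatGet j _ n hcollen m i hj hi]
        have hcl : (pvCol matrix j).length = n := by
          simp [pvCol, PySem.List.length_sorted, hn]
        rw [List.getD_eq_getElem _ _ (by rw [List.length_map, hcl]; exact hi)]
        simp only [List.getElem_map]
        unfold pvEnt
        rw [PySem.List.getD_map_range _ m j [] hj]
        rw [List.getD_eq_getElem _ _ (by rw [hcl]; exact hi)]
      · simp [hj]

-- ===== VERDICT (by name: the statement is the Claim_ definition above) =====
theorem sort_columns_spec : Claim_equal_sort_columns := by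
  intro matrix _ _
  unfold Spec_sort_columns
  rw [pvA_closed, pvB_closed]
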